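-- pv_equiv track=rewrite | github.com/gevaertlab/DUNE | src/autoencoder/models/VAEs.py | _get_encoded_shape
-- ===== SOURCE A (Python) =====
-- def _get_encoded_shape(input_dim, feature_list):
--
--     def block_shaping(dim):
--         k, s, p = 3, 1, 1
--         dim = int(((dim + 2*p - (k-1) - 1) / s) + 1)  # block conv1
--         dim = int(((dim + 2*p - (k-1) - 1) / s) + 1)  # block conv2
--
--         k, s, p = 2, 2, 0
--         dim = int(((dim + 2*p - (k-1) - 1) / s) + 1)  # maxpool
--         return dim
--
--     D, H, W = input_dim
--     for C in feature_list:
--         D = block_shaping(D)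
--         H = block_shaping(H)
--         W = block_shaping(W)
--
--     C = feature_list[-1]
--
--     return [C, D, H, W], int(C*D*H*W)
-- ===== SOURCE B (Python) =====
-- def _get_encoded_shape(input_dim, feature_list):
--     # Each conv block (k=3, s=1, p=1) preserves the spatial size and each 2x2
--     # maxpool halves it, so n = len(feature_list) layers divide each dimension
--     # by 2**n; the shape entries are ints, so truncate.
--     C = feature_list[-1]
--     scale = 2 ** len(feature_list)
--     D, H, W = (int(d / scale) for d in input_dim)
--     return [C, D, H, W], int(C * D * H * W)
-- ===== Notes on version B (the rewrite author's own statement) =====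
-- stated objective: simpler
-- what changed: Replaces the per-layer loop and the conv/pool shape-arithmetic helper by a closed form: each layer halves every spatial dimension, so the result is int(dim / 2**len(feature_list)); Pre_ excludes only the empty feature_list, on which A raises IndexError at feature_list[-1].
import Mathlib
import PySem

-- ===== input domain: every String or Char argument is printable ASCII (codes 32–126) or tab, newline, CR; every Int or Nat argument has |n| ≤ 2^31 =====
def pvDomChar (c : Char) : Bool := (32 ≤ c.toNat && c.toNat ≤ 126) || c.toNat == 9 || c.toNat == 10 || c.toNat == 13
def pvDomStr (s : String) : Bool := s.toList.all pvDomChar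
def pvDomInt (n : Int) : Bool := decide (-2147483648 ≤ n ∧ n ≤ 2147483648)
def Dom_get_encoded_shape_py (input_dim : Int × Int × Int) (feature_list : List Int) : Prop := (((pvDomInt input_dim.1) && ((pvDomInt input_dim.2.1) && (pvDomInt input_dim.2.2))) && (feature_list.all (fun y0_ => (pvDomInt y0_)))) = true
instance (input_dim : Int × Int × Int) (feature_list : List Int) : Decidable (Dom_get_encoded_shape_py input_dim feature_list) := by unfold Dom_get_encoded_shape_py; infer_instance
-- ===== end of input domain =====

-- B replaces A's per-layer loop + conv/pool shape helper by a closed form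
-- (each layer halves each spatial dimension: int(d / 2^len(feature_list))); objective: simpler.

-- ===== PORT A =====
-- Python's int(x/s + 1): int() truncates toward zero and x/s + 1 = (numerator + s)/s as exact
-- rationals; the floats involved are exact on Dom's |n| ≤ 2^31 range, so this is (num + s).tdiv s.
def pvBlockShaping (dim : Int) : Int :=
  let dim := (dim + 2*1 - (3-1) - 1 + 1).tdiv 1   -- block conv1
  let dim := (dim + 2*1 - (3-1) - 1 + 1).tdiv 1   -- block conv2
  let dim := (dim + 2*0 - (2-1) - 1 + 2).tdiv 2   -- maxpool
  dim

def get_encoded_shape_py (input_dim : Int × Int × Int) (feature_list : List Int) : List Int × Int :=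
  let dhw := feature_list.foldl
    (fun (s : Int × Int × Int) _C => (pvBlockShaping s.1, pvBlockShaping s.2.1, pvBlockShaping s.2.2))
    input_dim
  -- feature_list[-1]; Pre_ excludes the empty list, where Python raises IndexError
  let C := (PySem.List.pyGet? feature_list (-1)).getD 0
  ([C, dhw.1, dhw.2.1, dhw.2.2], C * dhw.1 * dhw.2.1 * dhw.2.2)

-- ===== PORT B =====
-- Source B's int(d / scale): float division of |d| ≤ 2^31 by a power of two is exact (or yields
-- |result| < 1 when the power exceeds the float range), so int() of it is truncated division.
def get_encoded_shape_py_alt (input_dim : Int × Int × Int) (feature_list : List Int) : List Int × Int :=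
  let C := (PySem.List.pyGet? feature_list (-1)).getD 0   -- Pre_ excludes the empty list (IndexError)
  let scale : Int := 2 ^ feature_list.length
  let D := input_dim.1.tdiv scale
  let H := input_dim.2.1.tdiv scale
  let W := input_dim.2.2.tdiv scale
  ([C, D, H, W], C * D * H * W)

-- ===== PRECONDITION & SPEC =====
-- Pre_ excludes only the empty feature_list, on which both Pythons raise IndexError at feature_list[-1].
def Pre_get_encoded_shape_py (_input_dim : Int × Int × Int) (feature_list : List Int) : Prop :=
  feature_list ≠ []
instance (input_dim : Int × Int × Int) (feature_list : List Int) : Decidable (Pre_get_encoded_shape_py input_dim feature_list) := by unfold Pre_get_encoded_shape_py; infer_instance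

def pvWitness_get_encoded_shape_py : (Int × Int × Int) × List Int := ((8, 9, -10), [4, 8])

def Spec_get_encoded_shape_py (input_dim : Int × Int × Int) (feature_list : List Int) (out : List Int × Int) : Prop := out = get_encoded_shape_py_alt input_dim feature_list
instance (input_dim : Int × Int × Int) (feature_list : List Int) (out : List Int × Int) : Decidable (Spec_get_encoded_shape_py input_dim feature_list out) := by unfold Spec_get_encoded_shape_py; infer_instance

-- ===== CLAIM =====
def Claim_equal_get_encoded_shape_py : Prop := ∀ (input_dim : Int × Int × Int) (feature_list : List Int), Dom_get_encoded_shape_py input_dim feature_list → Pre_get_encoded_shape_py input_dim feature_list → Spec_get_encoded_shape_py input_dim feature_list (get_encoded_shape_py input_dim feature_list)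

-- ===== LEMMAS AND PROOFS =====

theorem pv_tdiv_nonneg_eq_ediv (a b : Int) (ha : 0 ≤ a) : a.tdiv b = a / b := by
  simp [Int.tdiv_eq_ediv, ha]

theorem pv_tdiv_comp (a b c : Int) (hb : 0 < b) (_hc : 0 < c) :
    (a.tdiv b).tdiv c = a.tdiv (b * c) := by
  have nonneg : ∀ x : Int, 0 ≤ x → (x.tdiv b).tdiv c = x.tdiv (b * c) := by
    intro x hx
    have h1 : 0 ≤ x / b := Int.ediv_nonneg hx hb.le
    rw [pv_tdiv_nonneg_eq_ediv x b hx, pv_tdiv_nonneg_eq_ediv _ c h1,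
        pv_tdiv_nonneg_eq_ediv x (b * c) hx, Int.ediv_ediv_of_nonneg hb.le]
  by_cases ha : 0 ≤ a
  · exact nonneg a ha
  · have hn := nonneg (-a) (by omega)
    calc (a.tdiv b).tdiv c = -(((-a).tdiv b).tdiv c) := by rw [Int.neg_tdiv, Int.neg_tdiv, neg_neg]
      _ = -((-a).tdiv (b * c)) := by rw [hn]
      _ = a.tdiv (b * c) := by rw [Int.neg_tdiv, neg_neg]

theorem pvBlockShaping_eq (d : Int) : pvBlockShaping d = d.tdiv 2 := by
  unfold pvBlockShaping
  norm_num [Int.tdiv_one]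
  congr 1
  ring

theorem pv_foldl_block (l : List Int) (d h w : Int) :
    l.foldl (fun (s : Int × Int × Int) _C =>
        (pvBlockShaping s.1, pvBlockShaping s.2.1, pvBlockShaping s.2.2)) (d, h, w)
      = (d.tdiv (2 ^ l.length), h.tdiv (2 ^ l.length), w.tdiv (2 ^ l.length)) := by
  induction l generalizing d h w with
  | nil => simp [Int.tdiv_one]
  | cons x xs ih =>
      have h2 : (0:Int) < 2 := by norm_num
      have hp : (0:Int) < 2 ^ xs.length := by positivity
      simp only [List.foldl_cons]
      rw [ih,
          pvBlockShaping_eq, pvBlockShaping_eq, pvBlockShaping_eq,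
          pv_tdiv_comp d 2 _ h2 hp, pv_tdiv_comp h 2 _ h2 hp, pv_tdiv_comp w 2 _ h2 hp,
          List.length_cons]
      ring_nf

-- ===== VERDICT =====
theorem get_encoded_shape_py_spec : Claim_equal_get_encoded_shape_py := by
  intro ⟨d, h, w⟩ feature_list _ _
  unfold Spec_get_encoded_shape_py get_encoded_shape_py get_encoded_shape_py_alt
  simp only [pv_foldl_block]
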